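-- pv_equiv track=rewrite | github.com/jungeun919/Algorithm-with-Python | Programmers/BruteForce/모의고사/code2.py | solution
-- ===== SOURCE A (Python) =====
-- def solution(answers):
--     answer = []
--     supo1 = [1,2,3,4,5]
--     supo2 = [2,1,2,3,2,4,2,5]
--     supo3 = [3,3,1,1,2,2,4,4,5,5]
--     score = [0,0,0]
--
--     for i in range(len(answers)):
--         ans = answers[i]
--         if (ans == supo1[i % len(supo1)]):
--             score[0] += 1
--         if (ans == supo2[i % len(supo2)]):
--             score[1] += 1
--         if (ans == supo3[i % len(supo3)]):
--             score[2] += 1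
--
--     for idx, val in enumerate(score):
--         if val == max(score):
--             answer.append(idx + 1)
--     return answer
-- ===== SOURCE B (Python) =====
-- def solution(answers):
--     # Histogram approach: one pass builds a table keyed by (position mod 40, answer)
--     # (40 = lcm of the three pattern lengths), then each guesser's score is read off
--     # the 40-entry table without rescanning the answers.
--     counts = {}
--     for i, a in enumerate(answers):
--         key = (i % 40, a)
--         counts[key] = counts.get(key, 0) + 1
--     patterns = [[1, 2, 3, 4, 5],
--                 [2, 1, 2, 3, 2, 4, 2, 5],
--                 [3, 3, 1, 1, 2, 2, 4, 4, 5, 5]]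
--     scores = [sum(counts.get((r, p[r % len(p)]), 0) for r in range(40))
--               for p in patterns]
--     best = max(scores)
--     return [k + 1 for k in range(3) if scores[k] == best]
-- ===== Notes on version B (the rewrite author's own statement) =====
-- stated objective: alternative
-- what changed: Instead of comparing every answer against all three cyclic patterns in one combined pass, B builds a histogram dict keyed by (index mod 40, answer) in a single pass (40 = lcm of the pattern lengths) and then computes each guesser's score by summing 40 table lookups, never rescanning the answers; winners are collected from the score list by index.
import Mathlib
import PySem

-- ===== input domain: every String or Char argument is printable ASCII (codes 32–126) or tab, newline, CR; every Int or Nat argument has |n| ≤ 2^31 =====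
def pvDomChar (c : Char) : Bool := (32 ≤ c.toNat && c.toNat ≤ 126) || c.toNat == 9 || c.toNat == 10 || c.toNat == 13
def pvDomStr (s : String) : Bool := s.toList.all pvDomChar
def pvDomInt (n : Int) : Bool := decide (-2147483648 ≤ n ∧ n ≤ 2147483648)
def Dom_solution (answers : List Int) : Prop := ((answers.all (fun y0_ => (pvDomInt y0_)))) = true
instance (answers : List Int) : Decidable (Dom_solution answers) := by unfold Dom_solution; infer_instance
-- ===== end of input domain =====

-- B replaces A's three-way comparison pass by a histogram dict keyed by
-- (index mod 40, answer); scores are then read off the 40-entry table (objective: alternative).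

-- ===== PORT A =====
-- literal port of A: one combined pass over enumerate(answers) keeping three counters,
-- then the index-collecting loop comparing with max(score)
def solution (answers : List Int) : List Int :=
  let supo1 : List Int := [1,2,3,4,5]
  let supo2 : List Int := [2,1,2,3,2,4,2,5]
  let supo3 : List Int := [3,3,1,1,2,2,4,4,5,5]
  let score : Int × Int × Int :=
    (PySem.List.enumerate answers).foldl
      (fun (sc : Int × Int × Int) p =>
        ((if p.2 = PySem.List.pyGetD supo1 (p.1 % (supo1.length : Int)) 0 then sc.1 + 1 else sc.1),
         (if p.2 = PySem.List.pyGetD supo2 (p.1 % (supo2.length : Int)) 0 then sc.2.1 + 1 else sc.2.1),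
         (if p.2 = PySem.List.pyGetD supo3 (p.1 % (supo3.length : Int)) 0 then sc.2.2 + 1 else sc.2.2)))
      (0, 0, 0)
  let scoreList : List Int := [score.1, score.2.1, score.2.2]
  let m : Int := ((PySem.List.max? scoreList (fun x => x)).getD 0)  -- max(score); list is nonempty
  (PySem.List.enumerate scoreList).foldl
    (fun acc q => if q.2 = m then acc ++ [q.1 + 1] else acc) []

-- ===== PORT B =====
-- B-side helper: the histogram dict built by Source B's first loop
def pvCounts (answers : List Int) : PySem.Dict (Int × Int) Int :=
  (PySem.List.enumerate answers).foldl
    (fun d q => d.insert (q.1 % 40, q.2) (d.getD (q.1 % 40, q.2) 0 + 1))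
    PySem.Dict.empty

-- literal port of Source B: build the histogram, sum 40 table lookups per pattern,
-- then collect winners by index over range(3)
def solution_alt (answers : List Int) : List Int :=
  let counts := pvCounts answers
  let patterns : List (List Int) := [[1,2,3,4,5],[2,1,2,3,2,4,2,5],[3,3,1,1,2,2,4,4,5,5]]
  let scores : List Int := patterns.map (fun p =>
    ((PySem.List.pyRange 0 40 1).map
      (fun r => counts.getD (r, PySem.List.pyGetD p (r % (p.length : Int)) 0) 0)).sum)
  let best : Int := ((PySem.List.max? scores (fun x => x)).getD 0)  -- max(scores); list is nonempty
  (PySem.List.pyRange 0 3 1).foldl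
    (fun acc k => if PySem.List.pyGetD scores k 0 = best then acc ++ [k + 1] else acc) []

-- ===== PRECONDITION & SPEC =====
def Spec_solution (answers : List Int) (out : List Int) : Prop := out = solution_alt answers
instance (answers : List Int) (out : List Int) : Decidable (Spec_solution answers out) := by unfold Spec_solution; infer_instance

-- ===== CLAIM (what is proved, stated in full; the proofs are below) =====
def Claim_equal_solution : Prop := ∀ (answers : List Int), Dom_solution answers → Spec_solution answers (solution answers)

-- ===== LEMMAS AND PROOFS =====

-- A's fold carrying three independent counters is three separate counting folds.
theorem solution_score_split (l : List (Int × Int)) (a b c : Int) :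
    l.foldl (fun (sc : Int × Int × Int) p =>
      ((if p.2 = PySem.List.pyGetD [1,2,3,4,5] (p.1 % (([1,2,3,4,5] : List Int).length : Int)) 0 then sc.1 + 1 else sc.1),
       (if p.2 = PySem.List.pyGetD [2,1,2,3,2,4,2,5] (p.1 % (([2,1,2,3,2,4,2,5] : List Int).length : Int)) 0 then sc.2.1 + 1 else sc.2.1),
       (if p.2 = PySem.List.pyGetD [3,3,1,1,2,2,4,4,5,5] (p.1 % (([3,3,1,1,2,2,4,4,5,5] : List Int).length : Int)) 0 then sc.2.2 + 1 else sc.2.2)))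
      (a, b, c)
    = (l.foldl (fun (s : Int) q => if q.2 = PySem.List.pyGetD [1,2,3,4,5] (q.1 % (([1,2,3,4,5] : List Int).length : Int)) 0 then s + 1 else s) a,
       l.foldl (fun (s : Int) q => if q.2 = PySem.List.pyGetD [2,1,2,3,2,4,2,5] (q.1 % (([2,1,2,3,2,4,2,5] : List Int).length : Int)) 0 then s + 1 else s) b,
       l.foldl (fun (s : Int) q => if q.2 = PySem.List.pyGetD [3,3,1,1,2,2,4,4,5,5] (q.1 % (([3,3,1,1,2,2,4,4,5,5] : List Int).length : Int)) 0 then s + 1 else s) c) := by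
  induction l generalizing a b c with
  | nil => rfl
  | cons x t ih => simp only [List.foldl_cons, ih]

-- if the key's first component never occurs in l, every indicator term is 0
theorem solution_sum_ite_notmem (l : List Int) (a b : Int) (f : Int → Int)
    (h : a ∉ l) :
    (l.map (fun r => if ((a, b) : Int × Int) = (r, f r) then (1:Int) else 0)).sum = 0 := by
  apply List.sum_eq_zero
  intro x hx
  obtain ⟨r, hr, rfl⟩ := List.mem_map.mp hx
  have hne : ((a, b) : Int × Int) ≠ (r, f r) := by
    intro e
    have e1 : a = r := congrArg Prod.fst e
    subst e1
    exact h hr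
  simp [hne]

-- summing the indicator of key (a,b) over a list containing a exactly once
theorem solution_sum_ite_key (l : List Int) (a b : Int) (f : Int → Int)
    (hnd : l.Nodup) (hmem : a ∈ l) :
    (l.map (fun r => if ((a, b) : Int × Int) = (r, f r) then (1:Int) else 0)).sum
    = if b = f a then 1 else 0 := by
  induction l with
  | nil => cases hmem
  | cons r t ih =>
    by_cases hra : r = a
    · subst hra
      have hnot : r ∉ t := (List.nodup_cons.mp hnd).1
      rw [List.map_cons, List.sum_cons, solution_sum_ite_notmem t r b f hnot]
      simp [Prod.ext_iff]
    · have hmem' : a ∈ t := by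
        rcases List.mem_cons.mp hmem with h | h
        · exact absurd h.symm hra
        · exact h
      have hne : ((a, b) : Int × Int) ≠ (r, f r) := fun e => hra (congrArg Prod.fst e).symm
      rw [List.map_cons, List.sum_cons, ih (List.nodup_cons.mp hnd).2 hmem', if_neg hne]
      ring

-- the histogram read-off over range(40) counts exactly the matching positions
theorem solution_sum_count_eq (l : List (Int × Int)) (f : Int → Int) :
    ((PySem.List.pyRange 0 40 1).map
      (fun r => (((l.map (fun q => (q.1 % 40, q.2))).count (r, f r) : Int)))).sum
    = (l.countP (fun q => decide (q.2 = f (q.1 % 40))) : Int) := by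
  induction l with
  | nil => simp
  | cons q t ih =>
    have hcnt : ∀ r : Int,
        (((q.1 % 40, q.2) :: t.map (fun q => (q.1 % 40, q.2))).count (r, f r) : Int)
        = ((t.map (fun q => (q.1 % 40, q.2))).count (r, f r) : Int)
          + (if ((q.1 % 40, q.2) : Int × Int) = (r, f r) then (1:Int) else 0) := by
      intro r
      rw [List.count_cons]
      by_cases h : ((q.1 % 40, q.2) : Int × Int) = (r, f r)
      · rw [if_pos (beq_iff_eq.mpr h)]
        push_cast
        rw [if_pos h]
      · rw [if_neg (fun hb => h (beq_iff_eq.mp hb))]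
        push_cast
        rw [if_neg h]
    simp only [List.map_cons, hcnt, List.countP_cons]
    rw [List.sum_map_add]
    have hmem : q.1 % 40 ∈ PySem.List.pyRange 0 40 1 := by
      rw [PySem.List.mem_pyRange_one]
      constructor
      · exact Int.emod_nonneg q.1 (by norm_num)
      · exact Int.emod_lt_of_pos q.1 (by norm_num)
    have hnd : (PySem.List.pyRange 0 40 1).Nodup := by decide
    rw [ih, solution_sum_ite_key _ _ _ _ hnd hmem]
    push_cast
    by_cases h : q.2 = f (q.1 % 40) <;> simp [h]

-- each of B's table-lookup scores equals A's counting pass for that pattern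
theorem solution_score_eq (answers : List Int) (p : List Int)
    (hdvd : ((p.length : Int)) ∣ 40) :
    ((PySem.List.pyRange 0 40 1).map
      (fun r => (pvCounts answers).getD (r, PySem.List.pyGetD p (r % (p.length : Int)) 0) 0)).sum
    = (PySem.List.enumerate answers).foldl
        (fun (s : Int) q => if q.2 = PySem.List.pyGetD p (q.1 % (p.length : Int)) 0 then s + 1 else s) 0 := by
  have hget : ∀ v : Int × Int, (pvCounts answers).getD v 0
      = (((PySem.List.enumerate answers).map (fun q => (q.1 % 40, q.2))).count v : Int) := by
    intro v
    unfold pvCounts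
    rw [← List.foldl_map (f := fun q : Int × Int => (q.1 % 40, q.2))
        (g := fun (d : PySem.Dict (Int × Int) Int) k => d.insert k (d.getD k 0 + 1))]
    rw [PySem.Dict.getD_foldl_insert_add_one]
    simp [PySem.Dict.empty, PySem.Dict.getD, PySem.Dict.get?]
  simp only [hget]
  rw [solution_sum_count_eq (PySem.List.enumerate answers)
      (fun r => PySem.List.pyGetD p (r % (p.length : Int)) 0)]
  rw [PySem.List.foldl_ite_add_one]
  have : ∀ q : Int × Int,
      (q.2 = PySem.List.pyGetD p (q.1 % 40 % (p.length : Int)) 0)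
      = (q.2 = PySem.List.pyGetD p (q.1 % (p.length : Int)) 0) := by
    intro q
    rw [Int.emod_emod_of_dvd q.1 hdvd]
  simp only [this]
  ring

-- ===== VERDICT (by name: the statement is the Claim_ definition above) =====
-- winner collection: A's enumerate-based loop and B's range(3)-indexing loop agree
theorem solution_select_eq (s1 s2 s3 m : Int) :
    (PySem.List.enumerate [s1,s2,s3]).foldl
      (fun acc q => if q.2 = m then acc ++ [q.1 + 1] else acc) ([] : List Int)
    = (PySem.List.pyRange 0 3 1).foldl
      (fun acc k => if PySem.List.pyGetD [s1,s2,s3] k 0 = m then acc ++ [k + 1] else acc) [] := by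
  simp [PySem.List.enumerate, PySem.List.pyRange, PySem.List.pyGetD, PySem.List.pyGet?,
        PySem.List.pyIdx?, List.range_succ]

-- ===== VERDICT (by name: the statement is the Claim_ definition above) =====
theorem solution_spec : Claim_equal_solution := by
  intro answers _
  unfold Spec_solution solution solution_alt
  simp only [List.map_cons, List.map_nil,
    solution_score_eq answers [1,2,3,4,5] (by decide),
    solution_score_eq answers [2,1,2,3,2,4,2,5] (by decide),
    solution_score_eq answers [3,3,1,1,2,2,4,4,5,5] (by decide),
    solution_score_split]
  exact solution_select_eq _ _ _ _
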